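-- pv_equiv track=rewrite | github.com/EliottFlechtner/libPQC | src/schemes/utils.py | mat_vec_add
-- ===== SOURCE A (Python) =====
-- from typing import Any, Mapping
--
-- def mat_vec_add(
--     matrix: list[list[Any]],
--     vector_entries: list[Any],
--     add_entries: list[Any],
--     zero_element: Any,
-- ) -> list[Any]:
--     """Compute matrix * vector + add_entries row-wise.
--
--     The element type is generic and must support `+` and `*`.
--     """
--     if not isinstance(matrix, list):
--         raise TypeError("matrix must be a list of rows")
--     if not isinstance(vector_entries, list):
--         raise TypeError("vector_entries must be a list")
--     if not isinstance(add_entries, list):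
--         raise TypeError("add_entries must be a list")
--
--     rows = len(matrix)
--     if rows != len(add_entries):
--         raise ValueError("matrix row count must equal add_entries length")
--     if rows == 0:
--         return []
--
--     cols = len(vector_entries)
--     out: list[Any] = []
--     for i, row in enumerate(matrix):
--         if not isinstance(row, list):
--             raise TypeError("each matrix row must be a list")
--         if len(row) != cols:
--             raise ValueError("matrix row width must equal vector length")
--
--         acc = zero_element
--         for j in range(cols):
--             acc = acc + (row[j] * vector_entries[j])
--         out.append(acc + add_entries[i])
--
--     return out
-- ===== SOURCE B (Python) =====
-- def mat_vec_add(matrix, vector_entries, add_entries, zero_element):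
--     """Compute matrix * vector + add_entries, accumulating column by column."""
--     if not isinstance(matrix, list):
--         raise TypeError("matrix must be a list of rows")
--     if not isinstance(vector_entries, list):
--         raise TypeError("vector_entries must be a list")
--     if not isinstance(add_entries, list):
--         raise TypeError("add_entries must be a list")
--
--     rows = len(matrix)
--     if rows != len(add_entries):
--         raise ValueError("matrix row count must equal add_entries length")
--
--     cols = len(vector_entries)
--     for row in matrix:
--         if not isinstance(row, list):
--             raise TypeError("each matrix row must be a list")
--         if len(row) != cols:
--             raise ValueError("matrix row width must equal vector length")
--
--     out = [zero_element] * rows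
--     for j, vj in enumerate(vector_entries):
--         out = [out[i] + matrix[i][j] * vj for i in range(rows)]
--     return [acc + a for acc, a in zip(out, add_entries)]
-- ===== Notes on version B (the rewrite author's own statement) =====
-- stated objective: alternative
-- what changed: B validates shapes up front, then accumulates the product column-by-column into a whole output vector (out[i] += matrix[i][j]*v[j] for each column j) and finally zips with add_entries, instead of A's row-by-row inner dot-product loop.
import Mathlib
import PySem

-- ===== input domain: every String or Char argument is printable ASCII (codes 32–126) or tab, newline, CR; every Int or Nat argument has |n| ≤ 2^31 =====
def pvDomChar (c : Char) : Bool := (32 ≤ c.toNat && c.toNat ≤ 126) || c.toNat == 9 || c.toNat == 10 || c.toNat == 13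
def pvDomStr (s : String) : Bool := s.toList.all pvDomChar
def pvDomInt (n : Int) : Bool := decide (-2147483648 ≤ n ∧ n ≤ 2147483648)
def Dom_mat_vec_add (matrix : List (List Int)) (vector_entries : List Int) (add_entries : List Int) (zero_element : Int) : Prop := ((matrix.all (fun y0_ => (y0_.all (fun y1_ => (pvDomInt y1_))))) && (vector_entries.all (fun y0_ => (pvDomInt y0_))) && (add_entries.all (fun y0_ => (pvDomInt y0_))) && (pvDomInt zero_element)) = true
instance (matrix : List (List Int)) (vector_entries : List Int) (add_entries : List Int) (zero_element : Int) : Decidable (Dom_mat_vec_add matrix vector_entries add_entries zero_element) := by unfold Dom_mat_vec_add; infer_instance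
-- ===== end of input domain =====

-- B accumulates the matrix-vector product column by column over a whole output
-- vector instead of row by row (alternative decomposition, same cost); raising
-- inputs of A (shape mismatches) are excluded by Pre_mat_vec_add.

-- ===== PORT A =====
-- The isinstance checks always succeed for arguments of the stated types; the
-- two raise sites (row count ≠ len(add_entries), row width ≠ len(vector_entries))
-- are excluded by Pre_mat_vec_add, so no value is produced for them here.
def mat_vec_add (matrix : List (List Int)) (vector_entries : List Int) (add_entries : List Int) (zero_element : Int) : List Int :=
  if matrix.length = 0 then []
  else
    (PySem.List.enumerate matrix 0).foldl
      (fun out p =>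
        out ++ [(PySem.List.pyRange 0 (vector_entries.length : Int) 1).foldl
          (fun acc j => acc + PySem.List.pyGetD p.2 j 0 * PySem.List.pyGetD vector_entries j 0)
          zero_element + PySem.List.pyGetD add_entries p.1 0])
      []

-- ===== PORT B =====
-- Literal port of Source B: out = [zero]*rows, then one pass per column updating
-- every row's accumulator, finally zip with add_entries.  The raise sites
-- (same shapes as A's) are excluded by Pre_mat_vec_add.
def mat_vec_add_alt (matrix : List (List Int)) (vector_entries : List Int) (add_entries : List Int) (zero_element : Int) : List Int :=
  (((PySem.List.enumerate vector_entries 0).foldl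
    (fun out p =>
      (PySem.List.pyRange 0 (matrix.length : Int) 1).map
        (fun i => PySem.List.pyGetD out i 0 +
          PySem.List.pyGetD (PySem.List.pyGetD matrix i []) p.1 0 * p.2))
    (List.replicate matrix.length zero_element)).zip add_entries).map (fun q => q.1 + q.2)

-- ===== PRECONDITION & SPEC =====
-- Pre_ excludes exactly the inputs on which Python A raises: a row count
-- different from len(add_entries) (ValueError) or a row whose width differs
-- from len(vector_entries) (ValueError).
def Pre_mat_vec_add (matrix : List (List Int)) (vector_entries : List Int) (add_entries : List Int) (zero_element : Int) : Prop :=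
  matrix.length = add_entries.length ∧ ∀ row ∈ matrix, row.length = vector_entries.length
instance (matrix : List (List Int)) (vector_entries : List Int) (add_entries : List Int) (zero_element : Int) : Decidable (Pre_mat_vec_add matrix vector_entries add_entries zero_element) := by unfold Pre_mat_vec_add; infer_instance

def pvWitness_mat_vec_add : List (List Int) × List Int × List Int × Int := ([[1, 2], [3, 4]], [5, 6], [7, 8], 0)

def Spec_mat_vec_add (matrix : List (List Int)) (vector_entries : List Int) (add_entries : List Int) (zero_element : Int) (out : List Int) : Prop := out = mat_vec_add_alt matrix vector_entries add_entries zero_element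
instance (matrix : List (List Int)) (vector_entries : List Int) (add_entries : List Int) (zero_element : Int) (out : List Int) : Decidable (Spec_mat_vec_add matrix vector_entries add_entries zero_element out) := by unfold Spec_mat_vec_add; infer_instance

-- ===== CLAIM (what is proved, stated in full; the proofs are below) =====
def Claim_equal_mat_vec_add : Prop := ∀ (matrix : List (List Int)) (vector_entries : List Int) (add_entries : List Int) (zero_element : Int), Dom_mat_vec_add matrix vector_entries add_entries zero_element → Pre_mat_vec_add matrix vector_entries add_entries zero_element → Spec_mat_vec_add matrix vector_entries add_entries zero_element (mat_vec_add matrix vector_entries add_entries zero_element)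

-- ===== LEMMAS AND PROOFS =====

-- enumerate as an indexed map (lets both ports be compared index by index)
theorem enum_eq_map {α : Type} (d : α) (v : List α) : ∀ s : Nat,
    PySem.List.enumerate v (s : Int) =
      (List.range v.length).map (fun k => (((s + k : Nat) : Int), v.getD k d)) := by
  induction v with
  | nil => intro s; simp [PySem.List.enumerate]
  | cons x v ih =>
    intro s
    have h1 : ((s : Int) + 1) = ((s + 1 : Nat) : Int) := by push_cast; ring
    rw [PySem.List.enumerate_cons, h1, ih (s + 1)]
    simp [List.range_succ_eq_map, List.map_map, Function.comp]
    intro a _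
    ring

-- B's column step applied to an out-vector aligned with matrix
theorem stepB (m : List (List Int)) (g : List Int → Int) (j vj : Int) :
    (PySem.List.pyRange 0 (m.length : Int) 1).map
        (fun i => PySem.List.pyGetD (m.map g) i 0 +
          PySem.List.pyGetD (PySem.List.pyGetD m i []) j 0 * vj)
      = m.map (fun row => g row + PySem.List.pyGetD row j 0 * vj) := by
  rw [PySem.List.pyRange_zero_nat, List.map_map]
  apply List.ext_getElem
  · simp
  · intro k h1 h2
    simp only [List.getElem_map, List.getElem_range, Function.comp_apply,
      PySem.List.pyGetD_natCast]
    rw [List.getD_eq_getElem _ _ (by simpa using h2), List.getD_eq_getElem _ _ (by simpa using h2),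
      List.getElem_map]

-- B's column loop keeps out aligned with matrix
theorem loopB (m : List (List Int)) (ps : List (Int × Int)) : ∀ (g : List Int → Int),
    ps.foldl
        (fun out p =>
          (PySem.List.pyRange 0 (m.length : Int) 1).map
            (fun i => PySem.List.pyGetD out i 0 +
              PySem.List.pyGetD (PySem.List.pyGetD m i []) p.1 0 * p.2))
        (m.map g)
      = m.map (fun row => ps.foldl (fun acc p => acc + PySem.List.pyGetD row p.1 0 * p.2) (g row)) := by
  induction ps with
  | nil => intro g; simp
  | cons p ps ih =>
    intro g
    rw [List.foldl_cons, stepB m g p.1 p.2, ih (fun row => g row + PySem.List.pyGetD row p.1 0 * p.2)]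
    simp [List.foldl_cons]

-- A's per-row dot product equals B's enumerate-driven dot product
theorem enum_eq_map0 {α : Type} (d : α) (v : List α) :
    PySem.List.enumerate v 0 =
      (List.range v.length).map (fun (k : Nat) => ((k : Int), v.getD k d)) := by
  simpa using enum_eq_map d v 0

theorem dot_eq (v row : List Int) (z : Int) :
    (PySem.List.pyRange 0 (v.length : Int) 1).foldl
        (fun acc j => acc + PySem.List.pyGetD row j 0 * PySem.List.pyGetD v j 0) z
      = (PySem.List.enumerate v 0).foldl
          (fun acc p => acc + PySem.List.pyGetD row p.1 0 * p.2) z := by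
  rw [PySem.List.pyRange_zero_nat, List.foldl_map, enum_eq_map0 0 v, List.foldl_map]
  simp

-- ===== VERDICT (by name: the statement is the Claim_ definition above) =====
theorem mat_vec_add_spec : Claim_equal_mat_vec_add := by
  intro m v a z _ hpre
  obtain ⟨h1, -⟩ := hpre
  unfold Spec_mat_vec_add mat_vec_add mat_vec_add_alt
  rw [show List.replicate m.length z = m.map (fun _ => z) by simp,
    loopB m (PySem.List.enumerate v 0) (fun _ => z)]
  by_cases hm : m.length = 0
  · rw [if_pos hm]
    rw [List.length_eq_zero_iff] at hm
    subst hm; simp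
  · rw [if_neg hm, enum_eq_map0 ([] : List Int) m, List.foldl_map,
      PySem.List.foldl_append_singleton_eq_map]
    apply List.ext_getElem
    · simp [h1]
    · intro k hk1 hk2
      have hkm : k < m.length := by simpa using hk1
      have hka : k < a.length := h1 ▸ hkm
      simp only [List.nil_append, List.getElem_map, List.getElem_range, List.getElem_zip,
        PySem.List.pyGetD_natCast]
      rw [List.getD_eq_getElem _ _ hkm, List.getD_eq_getElem _ _ hka, dot_eq]
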